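-- pv_equiv track=rewrite | github.com/Sloped-familyunit908/finclaw | src/ml/data_splitter.py | combinatorial_purged
-- ===== SOURCE A (Python) =====
-- from itertools import combinations
--
-- def combinatorial_purged(data: list, n_splits: int = 6,
--                          n_test_splits: int = 2) -> list[tuple[list[int], list[int]]]:
--     """Combinatorial Purged Cross-Validation (CPCV).
--
--     Generates all combinations of test groups, using remaining as train.
--     More paths = more robust backtest evaluation.
--
--     Args:
--         data: Input data.
--         n_splits: Total number of groups to divide data into.
--         n_test_splits: Number of groups to use as test in each combination.
--
--     Returns:
--         List of (train_indices, test_indices) tuples.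
--     """
--     n = len(data)
--     if n < n_splits:
--         raise ValueError(f"Not enough data ({n}) for {n_splits} splits")
--     if n_test_splits >= n_splits:
--         raise ValueError("n_test_splits must be less than n_splits")
--
--     group_size = n // n_splits
--     groups = []
--     for i in range(n_splits):
--         start = i * group_size
--         end = start + group_size if i < n_splits - 1 else n
--         groups.append(list(range(start, end)))
--
--     splits = []
--     for test_combo in combinations(range(n_splits), n_test_splits):
--         test_idx = []
--         for g in test_combo:
--             test_idx.extend(groups[g])
--         train_idx = []
--         for g in range(n_splits):
--             if g not in test_combo:
--                 train_idx.extend(groups[g])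
--         if train_idx and test_idx:
--             splits.append((sorted(train_idx), sorted(test_idx)))
--
--     return splits
-- ===== SOURCE B (Python) =====
-- from itertools import combinations
--
-- def combinatorial_purged(data: list, n_splits: int = 6,
--                          n_test_splits: int = 2) -> list[tuple[list[int], list[int]]]:
--     """CPCV: one flat group-of-index table and a single split pass per combination,
--     instead of building per-group index lists, extending and re-sorting them."""
--     n = len(data)
--     if n < n_splits:
--         raise ValueError(f"Not enough data ({n}) for {n_splits} splits")
--     if n_test_splits >= n_splits:
--         raise ValueError("n_test_splits must be less than n_splits")
--
--     group_size = n // n_splits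
--     group_of = [min(j // group_size, n_splits - 1) for j in range(n)]
--
--     splits = []
--     for test_combo in combinations(range(n_splits), n_test_splits):
--         test_set = set(test_combo)
--         train_idx = []
--         test_idx = []
--         for j, g in zip(range(n), group_of):
--             if g in test_set:
--                 test_idx.append(j)
--             else:
--                 train_idx.append(j)
--         if train_idx and test_idx:
--             splits.append((train_idx, test_idx))
--     return splits
-- ===== Notes on version B (the rewrite author's own statement) =====
-- stated objective: alternative
-- what changed: B replaces the per-group index lists, per-combination extend loops and re-sorting by a flat group_of[j] table computed once and a single ordered pass over range(n) that splits indices into train/test, so no sorting is needed.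
import Mathlib
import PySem

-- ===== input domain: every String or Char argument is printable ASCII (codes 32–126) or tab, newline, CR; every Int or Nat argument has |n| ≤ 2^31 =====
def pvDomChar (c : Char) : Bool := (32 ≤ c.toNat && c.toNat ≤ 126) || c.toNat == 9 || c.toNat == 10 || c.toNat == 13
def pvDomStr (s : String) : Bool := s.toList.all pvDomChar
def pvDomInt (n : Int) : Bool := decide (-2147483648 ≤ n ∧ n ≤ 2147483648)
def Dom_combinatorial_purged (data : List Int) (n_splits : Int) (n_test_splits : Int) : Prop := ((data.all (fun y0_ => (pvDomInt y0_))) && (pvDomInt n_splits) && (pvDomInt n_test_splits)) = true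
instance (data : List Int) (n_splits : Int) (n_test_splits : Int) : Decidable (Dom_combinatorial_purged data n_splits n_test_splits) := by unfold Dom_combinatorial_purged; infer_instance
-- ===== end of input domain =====

-- B replaces A's per-group index lists, per-combination extend loops and final sorts by a
-- flat group-of-index table and one ordered split pass over range(n) per combination
-- (objective: alternative; equal return values, no observable mutation in either version).

-- ===== PORT A =====
def combinatorial_purged (data : List Int) (n_splits : Int) (n_test_splits : Int) : List (List Int × List Int) :=
  let n : Int := data.length
  if n < n_splits then []                  -- Python: raise ValueError
  else if n_test_splits ≥ n_splits then [] -- Python: raise ValueError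
  else
    let group_size : Int := PySem.Int.floordiv n n_splits
    let groups : List (List Int) :=
      (PySem.List.pyRange 0 n_splits 1).map (fun i =>
        PySem.List.pyRange (i * group_size)
          (if i < n_splits - 1 then i * group_size + group_size else n) 1)
    (PySem.List.combinations (PySem.List.pyRange 0 n_splits 1) n_test_splits.toNat).foldl
      (fun splits test_combo =>
        let test_idx : List Int :=
          test_combo.foldl (fun acc g => acc ++ PySem.List.pyGetD groups g []) []
        let train_idx : List Int :=
          (PySem.List.pyRange 0 n_splits 1).foldl
            (fun acc g => if g ∈ test_combo then acc
                          else acc ++ PySem.List.pyGetD groups g []) []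
        if train_idx ≠ [] ∧ test_idx ≠ [] then
          splits ++ [(PySem.List.sorted train_idx (fun x => x),
                      PySem.List.sorted test_idx (fun x => x))]
        else splits) []

-- ===== PORT B =====
def combinatorial_purged_alt (data : List Int) (n_splits : Int) (n_test_splits : Int) : List (List Int × List Int) :=
  let n : Int := data.length
  if n < n_splits then []                  -- Python: raise ValueError
  else if n_test_splits ≥ n_splits then [] -- Python: raise ValueError
  else
    let group_size : Int := PySem.Int.floordiv n n_splits
    let group_of : List Int :=
      (PySem.List.pyRange 0 n 1).map
        (fun j => min (PySem.Int.floordiv j group_size) (n_splits - 1))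
    (PySem.List.combinations (PySem.List.pyRange 0 n_splits 1) n_test_splits.toNat).foldl
      (fun splits test_combo =>
        let test_set : PySem.Set Int := PySem.Set.ofList test_combo
        let tt : List Int × List Int :=
          ((PySem.List.pyRange 0 n 1).zip group_of).foldl
            (fun acc jg =>
              if PySem.Set.contains test_set jg.2 then (acc.1, acc.2 ++ [jg.1])
              else (acc.1 ++ [jg.1], acc.2)) ([], [])
        if tt.1 ≠ [] ∧ tt.2 ≠ [] then splits ++ [(tt.1, tt.2)] else splits) []

-- ===== PRECONDITION & SPEC =====
-- Pre_: exactly where Python A returns normally; outside it A raises ValueError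
-- (not enough data / n_test_splits ≥ n_splits / negative r in combinations) or ZeroDivisionError.
def Pre_combinatorial_purged (data : List Int) (n_splits : Int) (n_test_splits : Int) : Prop :=
  0 ≤ n_test_splits ∧ n_test_splits < n_splits ∧ n_splits ≤ (data.length : Int)
instance (data : List Int) (n_splits : Int) (n_test_splits : Int) : Decidable (Pre_combinatorial_purged data n_splits n_test_splits) := by unfold Pre_combinatorial_purged; infer_instance
def pvWitness_combinatorial_purged : List Int × Int × Int := ([5, 4, 3, 2, 1], 3, 1)

def Spec_combinatorial_purged (data : List Int) (n_splits : Int) (n_test_splits : Int) (out : List (List Int × List Int)) : Prop := out = combinatorial_purged_alt data n_splits n_test_splits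
instance (data : List Int) (n_splits : Int) (n_test_splits : Int) (out : List (List Int × List Int)) : Decidable (Spec_combinatorial_purged data n_splits n_test_splits out) := by unfold Spec_combinatorial_purged; infer_instance

-- ===== CLAIM (what is proved, stated in full; the proofs are below) =====
def Claim_equal_combinatorial_purged : Prop := ∀ (data : List Int) (n_splits : Int) (n_test_splits : Int), Dom_combinatorial_purged data n_splits n_test_splits → Pre_combinatorial_purged data n_splits n_test_splits → Spec_combinatorial_purged data n_splits n_test_splits (combinatorial_purged data n_splits n_test_splits)

-- ===== LEMMAS AND PROOFS =====

def pvGrp (S gs n i : Int) : List Int :=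
  PySem.List.pyRange (i * gs) (if i < S - 1 then i * gs + gs else n) 1

theorem pvGrp_chunks (S gs n : Int) (hgs : 0 ≤ gs) :
    ∀ (t : Nat), (t : Int) ≤ S - 1 →
      (PySem.List.pyRange 0 (t : Int) 1).flatMap (pvGrp S gs n) =
        PySem.List.pyRange 0 ((t : Int) * gs) 1 := by
  intro t
  induction t with
  | zero => intro _; simp [PySem.List.pyRange_one_eq_nil]
  | succ t ih =>
    intro ht
    have ht' : (t : Int) ≤ S - 1 := by push_cast at ht ⊢; omega
    have h0t : (0 : Int) ≤ t := by positivity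
    rw [show ((t + 1 : Nat) : Int) = (t : Int) + 1 by push_cast; ring,
        PySem.List.pyRange_one_succ_right h0t, List.flatMap_append, ih ht']
    have hlt : (t : Int) < S - 1 := by push_cast at ht; omega
    simp only [List.flatMap_cons, List.flatMap_nil, List.append_nil, pvGrp, if_pos hlt]
    rw [← PySem.List.pyRange_one_append 0 ((t : Int) * gs) ((t : Int) * gs + gs)
        (by positivity) (by omega)]
    congr 1; ring

theorem pvGrp_total (S gs n : Int) (hS : 0 < S) (hgs : 0 ≤ gs) (hle : (S - 1) * gs ≤ n) :
    (PySem.List.pyRange 0 S 1).flatMap (pvGrp S gs n) = PySem.List.pyRange 0 n 1 := by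
  have h1 : (0 : Int) ≤ S - 1 := by omega
  obtain ⟨t, ht⟩ : ∃ t : Nat, (t : Int) = S - 1 := ⟨(S - 1).toNat, Int.toNat_of_nonneg h1⟩
  have hgs0 : 0 ≤ (S - 1) * gs := by positivity
  have hsing : PySem.List.pyRange (S - 1) S 1 = [S - 1] := by
    have := PySem.List.pyRange_one_singleton (S - 1); rw [show S - 1 + 1 = S by ring] at this; exact this
  rw [PySem.List.pyRange_one_append 0 (S - 1) S h1 (by omega), List.flatMap_append, hsing,
      ← ht, pvGrp_chunks S gs n hgs t (by omega), ht]
  simp only [List.flatMap_cons, List.flatMap_nil, List.append_nil, pvGrp, lt_irrefl, if_false]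
  rw [← PySem.List.pyRange_one_append 0 ((S - 1) * gs) n hgs0 hle]

theorem pvGrp_groupOf (S gs n g j : Int) (hgs : 0 < gs) (_hg0 : 0 ≤ g) (hgS : g < S)
    (hj : j ∈ pvGrp S gs n g) : min (j / gs) (S - 1) = g := by
  unfold pvGrp at hj
  rw [PySem.List.mem_pyRange_one] at hj
  obtain ⟨hlo, hhi⟩ := hj
  have h1 : g ≤ j / gs := (Int.le_ediv_iff_mul_le hgs).mpr hlo
  by_cases hcase : g < S - 1
  · rw [if_pos hcase] at hhi
    have h2 : j / gs < g + 1 := (Int.ediv_lt_iff_lt_mul hgs).mpr (by nlinarith)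
    omega
  · rw [if_neg hcase] at hhi
    omega

theorem pvGrp_select (S gs n : Int) (q : Int → Bool) (hS : 0 < S) (hgs : 0 < gs)
    (hle : (S - 1) * gs ≤ n) :
    (PySem.List.pyRange 0 S 1).flatMap (fun g => if q g then pvGrp S gs n g else []) =
      (PySem.List.pyRange 0 n 1).filter (fun j => q (min (j / gs) (S - 1))) := by
  rw [← pvGrp_total S gs n hS (le_of_lt hgs) hle, List.filter_flatMap]
  apply List.flatMap_congr
  intro g hg
  rw [PySem.List.mem_pyRange_one] at hg
  have hall : ∀ j ∈ pvGrp S gs n g, min (j / gs) (S - 1) = g :=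
    fun j hj => pvGrp_groupOf S gs n g j hgs hg.1 hg.2 hj
  by_cases hq : q g = true
  · rw [if_pos hq]
    symm; rw [List.filter_eq_self]
    intro j hj; rw [hall j hj]; exact hq
  · rw [if_neg hq]
    symm; rw [List.filter_eq_nil_iff]
    intro j hj h; rw [hall j hj] at h; exact hq h


theorem pvPartition_fold (p : Int → Bool) :
    ∀ (l : List Int) (a b : List Int),
      l.foldl (fun acc j => if p j then (acc.1, acc.2 ++ [j]) else (acc.1 ++ [j], acc.2)) (a, b) =
        (a ++ l.filter (fun j => !p j), b ++ l.filter p) := by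
  intro l
  induction l with
  | nil => intro a b; simp
  | cons x t ih =>
    intro a b
    by_cases hx : p x = true <;> simp [List.foldl_cons, hx, ih]

theorem pvZip_range_map (l : List Int) (f : Int → Int) :
    l.zip (l.map f) = l.map (fun x => (x, f x)) := by
  induction l with
  | nil => rfl
  | cons x t ih => simp [ih]

theorem pvFlatMap_sublist {c l : List Int} (h : c.Sublist l) (hn : l.Nodup) (F : Int → List Int) :
    l.flatMap (fun g => if g ∈ c then F g else []) = c.flatMap F := by
  induction h with
  | slnil => simp
  | @cons c' l' x h ih =>
    have hn' : l'.Nodup := hn.of_cons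
    have hx : x ∉ c' := fun hmem => (List.nodup_cons.mp hn).1 (h.subset hmem)
    simp [List.flatMap_cons, hx, ih hn']
  | @cons₂ c' l' x h ih =>
    have hn' : l'.Nodup := hn.of_cons
    have hx : x ∉ l' := (List.nodup_cons.mp hn).1
    simp only [List.flatMap_cons, List.mem_cons, true_or, if_pos]
    rw [List.flatMap_congr (g := fun g => if g ∈ c' then F g else []) ?_, ih hn']
    intro g hg
    have : g ≠ x := fun e => hx (e ▸ hg)
    simp [this]

-- ===== VERDICT (by name: the statement is the Claim_ definition above) =====
theorem combinatorial_purged_spec : Claim_equal_combinatorial_purged := by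
  intro data S k _ hpre
  obtain ⟨hk0, hkS, hSn⟩ := hpre
  have hS : 0 < S := by omega
  unfold Spec_combinatorial_purged combinatorial_purged combinatorial_purged_alt
  simp only []
  set n : Int := (data.length : Int) with hn
  have hn0 : 0 ≤ n := by positivity
  rw [if_neg (by omega), if_neg (by omega), if_neg (by omega), if_neg (by omega)]
  have hgsd : PySem.Int.floordiv n S = n / S := PySem.Int.floordiv_eq_ediv_of_pos hS
  set gs : Int := n / S with hgs_def
  have hgs : 0 < gs := by
    have : 1 ≤ n / S := (Int.le_ediv_iff_mul_le hS).mpr (by omega)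
    omega
  have hSg : gs * S ≤ n := Int.ediv_mul_le n (ne_of_gt hS)
  have hle : (S - 1) * gs ≤ n := by nlinarith
  rw [hgsd]
  apply PySem.List.foldl_congr_mem
  intro acc c hc
  have hsub : c.Sublist (PySem.List.pyRange 0 S 1) :=
    ((PySem.List.mem_combinations_iff _ _ _).mp hc).1
  -- common facts about c
  have hmemS : ∀ g ∈ c, 0 ≤ g ∧ g < S := by
    intro g hg
    have := PySem.List.mem_pyRange_one.mp (hsub.subset hg)
    omega
  -- A's groups list indexed at g ∈ c is pvGrp
  have hgetD : ∀ g ∈ c, PySem.List.pyGetD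
      ((PySem.List.pyRange 0 S 1).map (fun i =>
        PySem.List.pyRange (i * gs) (if i < S - 1 then i * gs + gs else n) 1)) g ([] : List Int)
      = pvGrp S gs n g := by
    intro g hg
    obtain ⟨h0, h1⟩ := hmemS g hg
    exact PySem.List.pyGetD_map_pyRange_of_nonneg _ S g [] h0 h1
  simp only [PySem.Int.floordiv_eq_ediv_of_pos hgs]
  -- the common split predicate and the two filter values
  set p : Int → Bool := fun j => (PySem.Set.ofList c).contains (min (j / gs) (S - 1)) with hp
  have hpdec : ∀ j : Int, p j = decide (min (j / gs) (S - 1) ∈ c) := by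
    intro j; simp [hp, PySem.Set.contains, PySem.Set.mem_ofList]
  set V1 : List Int := (PySem.List.pyRange 0 n 1).filter (fun j => !p j) with hV1
  set V2 : List Int := (PySem.List.pyRange 0 n 1).filter p with hV2
  -- B's single pass produces the two filters
  have hB : List.foldl
      (fun (acc : List Int × List Int) (jg : Int × Int) =>
        if (PySem.Set.ofList c).contains jg.2 = true then (acc.1, acc.2 ++ [jg.1])
        else (acc.1 ++ [jg.1], acc.2)) ([], [])
      ((PySem.List.pyRange 0 n).zip
        (List.map (fun j => min (j / gs) (S - 1)) (PySem.List.pyRange 0 n))) = (V1, V2) := by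
    rw [pvZip_range_map, List.foldl_map]
    exact (pvPartition_fold p (PySem.List.pyRange 0 n 1) [] []).trans (by simp [hV1, hV2])
  -- A's test loop: extend group-by-group = filter of range(n)
  have htest : List.foldl
      (fun (acc : List Int) (g : Int) => acc ++ PySem.List.pyGetD
        (List.map (fun i => PySem.List.pyRange (i * gs) (if i < S - 1 then i * gs + gs else n))
          (PySem.List.pyRange 0 S)) g []) [] c = V2 := by
    rw [PySem.List.foldl_append_eq_flatMap, List.nil_append,
        List.flatMap_congr (g := pvGrp S gs n) hgetD,
        ← pvFlatMap_sublist hsub (PySem.List.nodup_pyRange_one 0 S) (pvGrp S gs n)]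
    have hsel := pvGrp_select S gs n (fun g => decide (g ∈ c)) hS hgs hle
    simp only [decide_eq_true_eq] at hsel
    rw [hsel, hV2]
    exact List.filter_congr (fun j _ => ((hpdec j).trans rfl).symm)
  -- A's train loop: extend the complement groups = filter of range(n)
  have htrain : List.foldl
      (fun (acc : List Int) (g : Int) =>
        if g ∈ c then acc
        else acc ++ PySem.List.pyGetD
          (List.map (fun i => PySem.List.pyRange (i * gs) (if i < S - 1 then i * gs + gs else n))
            (PySem.List.pyRange 0 S)) g []) [] (PySem.List.pyRange 0 S) = V1 := by
    rw [PySem.List.foldl_congr_mem _ _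
        (fun acc g => acc ++ (if (!decide (g ∈ c)) then pvGrp S gs n g else [])) _ ?_]
    · rw [PySem.List.foldl_append_eq_flatMap, List.nil_append,
          pvGrp_select S gs n (fun g => !decide (g ∈ c)) hS hgs hle, hV1]
      exact List.filter_congr (fun j _ => by rw [hpdec j])
    · intro acc g hg
      by_cases hgc : g ∈ c
      · simp [hgc]
      · obtain ⟨h0, h1⟩ := PySem.List.mem_pyRange_one.mp hg
        simp [hgc, PySem.List.pyGetD_map_pyRange_of_nonneg _ S g ([] : List Int) (by omega) (by omega), pvGrp]
  -- both filters are already ascending, so A's sorts are the identity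
  have hpair : ∀ q : Int → Bool, PySem.List.sorted ((PySem.List.pyRange 0 n 1).filter q) (fun x => x) = (PySem.List.pyRange 0 n 1).filter q := by
    intro q
    exact PySem.List.sorted_eq_self_of_pairwise _ _
      (((PySem.List.pairwise_lt_pyRange_one 0 n).filter q).imp le_of_lt)
  rw [hB, htest, htrain, hV1, hV2, hpair, hpair]
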